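-- pv_equiv track=rewrite | github.com/lishuhuakai/CS | CS262_Building_A_Web_Browser/chap03/hw/Detecting_Ambiguity.py | isambigEx
-- ===== SOURCE A (Python) =====
-- def expand(tokens_and_derivation, grammar):
--     (tokens, derivation) = tokens_and_derivation
--     for token_pos in range(len(tokens)): # for each token
--         for rule_index in range(len(grammar)): # for each rule
--             rule = grammar[rule_index]
--             if tokens[token_pos] == rule[0]:
--                 yield ((tokens[0:token_pos] + rule[1] + tokens[token_pos+1:]), derivation + [rule_index])
--
-- def isambigEx(grammar, start, utterance):
--     enumerated = [([start],[])]
--     while True: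
--         # ENUMERATE
--         new_enumerated = enumerated
--
--         for u in enumerated:
--             for i in expand(u, grammar):
--                 if not i in new_enumerated:
--                     new_enumerated = new_enumerated + [i]
--
--         if new_enumerated != enumerated:
--             # Found something new keep going!
--             enumerated = new_enumerated
--         else:
--             break
--     return len([x for x in enumerated if x[0] == utterance]) > 1
-- ===== SOURCE B (Python) =====
-- def isambigEx(grammar, start, utterance):
--     # Worklist/BFS: each derivation is expanded exactly once; a set of hashable
--     # keys replaces A's list-membership test and re-scan fixpoint.
--     init = ([start], [])
--     items = [init]
--     seen = {(tuple(init[0]), tuple(init[1]))}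
--     count = 0
--     i = 0
--     while i < len(items):
--         tokens, derivation = items[i]
--         i += 1
--         if tokens == utterance:
--             count += 1
--         for pos, tok in enumerate(tokens):
--             for ri, rule in enumerate(grammar):
--                 if tok == rule[0]:
--                     new = (tokens[:pos] + rule[1] + tokens[pos + 1:],
--                            derivation + [ri])
--                     key = (tuple(new[0]), tuple(new[1]))
--                     if key not in seen:
--                         seen.add(key)
--                         items.append(new)
--     return count > 1
-- ===== Notes on version B (the rewrite author's own statement) =====
-- stated objective: alternative
-- what changed: Replaced A's whole-list re-scan fixpoint (re-expanding every recorded derivation each round with a list-membership dedup and a final filter pass) by a single-pass BFS worklist that expands each derivation exactly once, dedups via a hash set of tuple keys, and counts utterance matches as items are popped.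
import Mathlib
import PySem

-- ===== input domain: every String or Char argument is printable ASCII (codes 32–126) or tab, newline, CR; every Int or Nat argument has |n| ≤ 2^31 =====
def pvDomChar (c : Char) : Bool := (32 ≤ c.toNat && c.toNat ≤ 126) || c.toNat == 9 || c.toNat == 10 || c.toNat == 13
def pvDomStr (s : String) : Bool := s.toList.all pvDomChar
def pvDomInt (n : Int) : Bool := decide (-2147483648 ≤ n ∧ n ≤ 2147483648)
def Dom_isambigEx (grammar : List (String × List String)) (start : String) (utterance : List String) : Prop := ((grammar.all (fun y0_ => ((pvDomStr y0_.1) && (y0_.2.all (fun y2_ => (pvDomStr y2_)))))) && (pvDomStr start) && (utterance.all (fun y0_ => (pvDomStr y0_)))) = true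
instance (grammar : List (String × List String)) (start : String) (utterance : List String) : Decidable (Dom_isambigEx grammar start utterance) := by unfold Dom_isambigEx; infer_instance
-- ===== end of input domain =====

-- B replaces A's whole-list re-scan fixpoint by a single-pass BFS worklist with a
-- seen-set that expands each derivation exactly once, counting matches as items
-- are popped (alternative algorithm, same return value on all of Pre_).

-- Shared fuel bound for the two ports of Python's unbounded `while` loops: a
-- potential function of the grammar.  pvS g k t is the depth-k expansion
-- potential of symbol t; pvN bounds the number of distinct derivations
-- reachable from [start] whenever A's loop terminates (proved below).
def pvS (g : List (String × List String)) : Nat → String → Nat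
  | 0, _ => 0
  | k+1, t => ((g.filter (fun r => r.1 == t)).map (fun r => 1 + (r.2.map (pvS g k)).sum)).sum

def pvF (g : List (String × List String)) : Nat := g.length + 1

def pvD (g : List (String × List String)) (start : String) : Nat :=
  max (pvF g) (pvS g (pvF g) start)

def pvSyms (g : List (String × List String)) (start : String) : List String :=
  start :: g.flatMap (fun r => r.2)

def pvRmax (g : List (String × List String)) : Nat :=
  (g.map (fun r => r.2.length)).foldr max 0

def pvN (g : List (String × List String)) (start : String) : Nat :=
  ((pvSyms g start).length + 1) ^ (1 + pvD g start * pvRmax g) * ((g.length + 1) ^ (pvD g start))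

-- ===== PORT A =====
-- expand(): the generator's double loop over token positions and rule indices.
def pvExpandA (g : List (String × List String)) (tokens : List String)
    (derivation : List Nat) : List (List String × List Nat) :=
  (List.range tokens.length).flatMap (fun pos =>
    (List.range g.length).filterMap (fun ri =>
      let rule := g.getD ri ("", [])
      if tokens.getD pos "" == rule.1 then
        some (tokens.take pos ++ rule.2 ++ tokens.drop (pos + 1), derivation ++ [ri])
      else none))

-- one body of A's `while True` loop: new_enumerated starts as enumerated and
-- every freshly expanded item not already present is appended.
def pvRoundA (g : List (String × List String))
    (enumerated : List (List String × List Nat)) : List (List String × List Nat) :=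
  enumerated.foldl (fun newE u =>
    (pvExpandA g u.1 u.2).foldl (fun newE i =>
      if i ∈ newE then newE else newE ++ [i]) newE) enumerated

-- A's `while True`; the fuel replaces the unbounded loop (under Pre_ the loop
-- provably stabilizes within pvN g start + 1 rounds, see pvLoopA_spec below).
def pvLoopA (g : List (String × List String)) :
    Nat → List (List String × List Nat) → List (List String × List Nat)
  | 0, enumerated => enumerated
  | fuel + 1, enumerated =>
    let ne := pvRoundA g enumerated
    if ne = enumerated then enumerated else pvLoopA g fuel ne

def isambigEx (grammar : List (String × List String)) (start : String)
    (utterance : List String) : Bool :=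
  decide (((pvLoopA grammar (pvN grammar start + 2) [([start], [])]).filter
    (fun x => x.1 == utterance)).length > 1)

-- ===== PORT B =====
-- one popped item's double `enumerate` loop of Source B: st = (seen, newly queued
-- items); enumerate is ported as zipIdx.
def pvStepB (g : List (String × List String)) (tokens : List String)
    (derivation : List Nat)
    (st : PySem.Set (List String × List Nat) × List (List String × List Nat)) :
    PySem.Set (List String × List Nat) × List (List String × List Nat) :=
  (tokens.zipIdx).foldl (fun st pt =>
    (g.zipIdx).foldl (fun st rr =>
      if pt.1 == rr.1.1 then
        let nw := (tokens.take pt.2 ++ rr.1.2 ++ tokens.drop (pt.2 + 1),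
                   derivation ++ [rr.2])
        if nw ∈ st.1 then st else (PySem.Set.add st.1 nw, st.2 ++ [nw])
      else st) st) st

-- Source B's worklist loop (`while i < len(items)`; queue = items[i:]); the fuel
-- replaces the unbounded loop (under Pre_ at most pvN g start items are ever
-- queued, see pvLoopB_spec below).
def pvLoopB (g : List (String × List String)) (utterance : List String) :
    Nat → List (List String × List Nat) → PySem.Set (List String × List Nat) → Nat → Nat
  | 0, _, _, count => count
  | _ + 1, [], _, count => count
  | fuel + 1, u :: rest, seen, count =>
    let count := if u.1 == utterance then count + 1 else count
    let st := pvStepB g u.1 u.2 (seen, [])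
    pvLoopB g utterance fuel (rest ++ st.2) st.1 count

def isambigEx_alt (grammar : List (String × List String)) (start : String)
    (utterance : List String) : Bool :=
  decide (pvLoopB grammar utterance (pvN grammar start + 1) [([start], [])]
    (PySem.Set.ofList [([start], [])]) 0 > 1)

-- ===== PRECONDITION & SPEC =====
-- pvChain g k t: some chain of k+1 rule applications starts at symbol t
-- (a walk of k+1 edges in the graph lhs → its rhs symbols; a property of the
-- grammar as a finite graph, independent of either port's computation).
def pvChain (g : List (String × List String)) : Nat → String → Bool
  | 0, t => g.any (fun r => r.1 == t)
  | k+1, t => g.any (fun r => r.1 == t && r.2.any (fun y => pvChain g k y))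

-- Pre_ is a static condition on the grammar as a graph: no walk of |grammar|+1
-- edges leaves `start`, i.e. no rule cycle is reachable from start — exactly
-- the inputs on which A's `while True` loop terminates; on every excluded
-- input A loops forever (returns nothing).
def Pre_isambigEx (grammar : List (String × List String)) (start : String)
    (utterance : List String) : Prop :=
  pvChain grammar grammar.length start = false

instance (grammar : List (String × List String)) (start : String) (utterance : List String) : Decidable (Pre_isambigEx grammar start utterance) := by unfold Pre_isambigEx; infer_instance

def pvWitness_isambigEx : (List (String × List String)) × String × List String :=
  ([("S", ["a", "b"]), ("S", ["a"]), ("S", ["a"])], "S", ["a"])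

def Spec_isambigEx (grammar : List (String × List String)) (start : String) (utterance : List String) (out : Bool) : Prop := out = isambigEx_alt grammar start utterance
instance (grammar : List (String × List String)) (start : String) (utterance : List String) (out : Bool) : Decidable (Spec_isambigEx grammar start utterance out) := by unfold Spec_isambigEx; infer_instance

-- ===== CLAIM (what is proved, stated in full; the proofs are below) =====
def Claim_equal_isambigEx : Prop := ∀ (grammar : List (String × List String)) (start : String) (utterance : List String), Dom_isambigEx grammar start utterance → Pre_isambigEx grammar start utterance → Spec_isambigEx grammar start utterance (isambigEx grammar start utterance)

-- ===== LEMMAS AND PROOFS =====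

-- the derivations reachable from [start]: what both programs enumerate
inductive pvReach (g : List (String × List String)) (start : String) :
    List String × List Nat → Prop
  | init : pvReach g start ([start], [])
  | step {x y : List String × List Nat} :
      pvReach g start x → y ∈ pvExpandA g x.1 x.2 → pvReach g start y

theorem pvReachSub {g : List (String × List String)} {start : String}
    {l : List (List String × List Nat)} (hinit : ([start], ([] : List Nat)) ∈ l)
    (hcl : ∀ u ∈ l, ∀ i ∈ pvExpandA g u.1 u.2, i ∈ l) :
    ∀ x, pvReach g start x → x ∈ l := by
  intro x hx
  induction hx with
  | init => exact hinit
  | step hx hy ih => exact hcl _ ih _ hy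

theorem pvExpandA_mem {g : List (String × List String)} {toks : List String}
    {der : List Nat} {y : List String × List Nat} :
    y ∈ pvExpandA g toks der ↔
      ∃ pos : Nat, ∃ hpos : pos < toks.length, ∃ ri : Nat, ∃ hri : ri < g.length,
        toks[pos] = (g[ri]).1 ∧
        y = (toks.take pos ++ (g[ri]).2 ++ toks.drop (pos + 1), der ++ [ri]) := by
  unfold pvExpandA
  simp only [List.mem_flatMap, List.mem_range, List.mem_filterMap]
  constructor
  · rintro ⟨pos, hpos, ri, hri, hy⟩
    rw [List.getD_eq_getElem toks "" hpos, List.getD_eq_getElem g ("", []) hri] at hy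
    by_cases hc : toks[pos] = (g[ri]).1
    · rw [if_pos (by simpa using hc)] at hy
      exact ⟨pos, hpos, ri, hri, hc, (Option.some_inj.1 hy).symm⟩
    · rw [if_neg (by simpa using hc)] at hy; cases hy
  · rintro ⟨pos, hpos, ri, hri, hc, rfl⟩
    refine ⟨pos, hpos, ri, hri, ?_⟩
    rw [List.getD_eq_getElem toks "" hpos, List.getD_eq_getElem g ("", []) hri,
      if_pos (by simpa using hc)]

-- ---- potential lemmas ----
theorem pvS_succ (g : List (String × List String)) (k : Nat) (t : String) :
    pvS g (k+1) t =
      ((g.filter (fun r => r.1 == t)).map (fun r => 1 + (r.2.map (pvS g k)).sum)).sum := rfl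

theorem pvS_mono (g : List (String × List String)) :
    ∀ (k : Nat) (t : String), pvS g k t ≤ pvS g (k+1) t := by
  intro k
  induction k with
  | zero => intro t; exact Nat.zero_le _
  | succ k ih =>
    intro t
    rw [pvS_succ, pvS_succ]
    apply List.sum_le_sum
    intro r hr
    exact Nat.add_le_add_left (List.sum_le_sum (fun y _ => ih y)) 1

theorem pvSumEqPoint {α : Type} (f h : α → Nat) :
    ∀ (l : List α), (∀ a ∈ l, f a ≤ h a) → (l.map h).sum = (l.map f).sum →
      ∀ a ∈ l, h a = f a := by
  intro l
  induction l with
  | nil => intro _ _ a ha; cases ha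
  | cons b t ih =>
    intro hle hsum a ha
    simp only [List.map_cons, List.sum_cons] at hsum
    have hb : f b ≤ h b := hle b List.mem_cons_self
    have hts : (t.map f).sum ≤ (t.map h).sum :=
      List.sum_le_sum (fun x hx => hle x (List.mem_cons_of_mem _ hx))
    rcases List.mem_cons.1 ha with rfl | ha'
    · omega
    · exact ih (fun x hx => hle x (List.mem_cons_of_mem _ hx)) (by omega) a ha'

theorem pvStabSucc (g : List (String × List String)) :
    ∀ (k : Nat) (t : String), pvS g (k+1) t = pvS g k t →
      pvS g (k+2) t = pvS g (k+1) t := by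
  intro k
  induction k with
  | zero =>
    intro t h
    have h0 : pvS g (0+1) t = 0 := h
    rw [pvS_succ g 0 t] at h0
    have hf : g.filter (fun r => r.1 == t) = [] := by
      cases hfe : g.filter (fun r => r.1 == t) with
      | nil => rfl
      | cons r rs =>
        rw [hfe] at h0
        simp only [List.map_cons, List.sum_cons] at h0
        omega
    show pvS g (1+1) t = pvS g (0+1) t
    rw [pvS_succ g 1 t, pvS_succ g 0 t, hf]
    rfl
  | succ k ih =>
    intro t h
    rw [pvS_succ, pvS_succ] at h
    have hpt := pvSumEqPoint (fun r => 1 + (r.2.map (pvS g k)).sum)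
      (fun r => 1 + (r.2.map (pvS g (k+1))).sum) (g.filter (fun r => r.1 == t))
      (fun r _ => Nat.add_le_add_left (List.sum_le_sum (fun y _ => pvS_mono g k y)) 1) h
    have key : ∀ r ∈ g.filter (fun r => r.1 == t), ∀ y ∈ r.2,
        pvS g (k+2) y = pvS g (k+1) y := by
      intro r hr y hy
      have h1 := hpt r hr
      simp only [] at h1
      have h2 : (r.2.map (pvS g (k+1))).sum = (r.2.map (pvS g k)).sum := by omega
      exact ih y (pvSumEqPoint (pvS g k) (pvS g (k+1)) r.2
        (fun y' _ => pvS_mono g k y') h2 y hy)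
    rw [pvS_succ, pvS_succ]
    congr 1
    apply List.map_congr_left
    intro r hr
    congr 1
    exact congrArg List.sum (List.map_congr_left (fun y hy => key r hr y hy))

theorem pvStabGE (g : List (String × List String)) {k : Nat} {t : String}
    (h : pvS g (k+1) t = pvS g k t) : ∀ j, k ≤ j → pvS g j t = pvS g k t := by
  have H : ∀ d, pvS g (k+d+1) t = pvS g (k+d) t := by
    intro d
    induction d with
    | zero => exact h
    | succ d ihd => exact pvStabSucc g (k+d) t ihd
  intro j hj
  obtain ⟨d, rfl⟩ : ∃ d, j = k + d := ⟨j - k, by omega⟩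
  clear hj
  induction d with
  | zero => rfl
  | succ d ihd => rw [show k+(d+1) = (k+d)+1 from rfl, H d, ihd]

theorem pvChainStab (g : List (String × List String)) :
    ∀ (k : Nat) (t : String), pvChain g k t = false → pvS g (k+1) t = pvS g k t := by
  intro k
  induction k with
  | zero =>
    intro t h
    have hf : g.filter (fun r => r.1 == t) = [] := by
      rw [List.filter_eq_nil_iff]
      intro r hr
      have := List.any_eq_false.1 h r hr
      simpa using this
    rw [pvS_succ, hf]
    rfl
  | succ k ih =>
    intro t h
    have hall : ∀ r ∈ g, r.1 = t → ∀ y ∈ r.2, pvChain g k y = false := by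
      intro r hr hrt y hy
      have hb : (r.1 == t && r.2.any (fun y => pvChain g k y)) = false := by
        have := List.any_eq_false.1 h r hr
        simpa using this
      rw [hrt] at hb
      simp only [beq_self_eq_true, Bool.true_and] at hb
      have := List.any_eq_false.1 hb y hy
      simpa using this
    rw [pvS_succ, pvS_succ]
    congr 1
    apply List.map_congr_left
    intro r hr
    have hrt : r.1 = t := by
      have := List.mem_filter.1 hr
      simpa using this.2
    congr 1
    apply congrArg List.sum
    apply List.map_congr_left
    intro y hy
    exact ih y (hall r (List.mem_filter.1 hr).1 hrt y hy)

theorem pvPreStab {g : List (String × List String)} {start : String}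
    (hpre : pvChain g g.length start = false) :
    pvS g (pvF g + 1) start = pvS g (pvF g) start := by
  cases hg : g.length with
  | zero =>
    rw [hg] at hpre
    have h1 := pvChainStab g 0 start hpre
    unfold pvF
    rw [hg]
    exact pvStabSucc g 0 start h1
  | succ m =>
    rw [hg] at hpre
    have h1 := pvChainStab g (m+1) start hpre
    unfold pvF
    rw [hg]
    exact pvStabSucc g (m+1) start h1

theorem pvKey {g : List (String × List String)} {ri : Nat} (hri : ri < g.length)
    (k : Nat) : ((g[ri]).2.map (pvS g k)).sum + 1 ≤ pvS g (k+1) ((g[ri]).1) := by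
  have hmem : g[ri] ∈ g.filter (fun r => r.1 == (g[ri]).1) :=
    List.mem_filter.2 ⟨List.getElem_mem hri, by simp⟩
  have hmm : (1 + ((g[ri]).2.map (pvS g k)).sum) ∈
      (g.filter (fun r => r.1 == (g[ri]).1)).map (fun r => 1 + (r.2.map (pvS g k)).sum) :=
    List.mem_map_of_mem hmem
  have := List.le_sum_of_mem hmm
  rw [pvS_succ]
  omega

-- ---- bounds along pvReach ----
theorem pvINV {g : List (String × List String)} {start : String}
    {x : List String × List Nat} (hx : pvReach g start x) :
    ∀ k : Nat, (x.1.map (pvS g k)).sum + x.2.length ≤ pvS g (k + x.2.length) start := by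
  induction hx with
  | init => intro k; simp
  | @step x y hx hy ih =>
    intro k
    obtain ⟨pos, hpos, ri, hri, hc, hy'⟩ := pvExpandA_mem.1 hy
    subst hy'
    simp only [List.map_append, List.sum_append, List.length_append, List.length_cons,
      List.length_nil, Nat.zero_add]
    have hsplit : x.1 = x.1.take pos ++ x.1[pos] :: x.1.drop (pos+1) := by
      conv_lhs => rw [← List.take_append_drop pos x.1]
      rw [List.drop_eq_getElem_cons hpos]
    have hIH := ih (k+1)
    have hx1 : ((x.1).map (pvS g (k+1))).sum =
        ((x.1.take pos).map (pvS g (k+1))).sum + pvS g (k+1) (x.1[pos]) +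
        ((x.1.drop (pos+1)).map (pvS g (k+1))).sum := by
      conv_lhs => rw [hsplit]
      simp only [List.map_append, List.map_cons, List.sum_append, List.sum_cons]
      omega
    have hkey : ((g[ri]).2.map (pvS g k)).sum + 1 ≤ pvS g (k+1) (x.1[pos]) := by
      rw [hc]; exact pvKey hri k
    have hmt : ((x.1.take pos).map (pvS g k)).sum ≤ ((x.1.take pos).map (pvS g (k+1))).sum :=
      List.sum_le_sum (fun y _ => pvS_mono g k y)
    have hmd : ((x.1.drop (pos+1)).map (pvS g k)).sum ≤
        ((x.1.drop (pos+1)).map (pvS g (k+1))).sum :=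
      List.sum_le_sum (fun y _ => pvS_mono g k y)
    have hfin : pvS g ((k+1) + x.2.length) start = pvS g (k + (x.2.length + 1)) start := by
      rw [show (k+1) + x.2.length = k + (x.2.length + 1) from by omega]
    omega

theorem pvDerBound {g : List (String × List String)} {start : String}
    (hpre : pvS g (pvF g + 1) start = pvS g (pvF g) start)
    {x : List String × List Nat} (hx : pvReach g start x) :
    x.2.length ≤ pvD g start := by
  have h0 := pvINV hx 0
  have hz : (x.1.map (pvS g 0)).sum = 0 :=
    List.sum_eq_zero (by intro a ha; obtain ⟨y, _, rfl⟩ := List.mem_map.1 ha; rfl)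
  rw [hz] at h0
  simp only [Nat.zero_add] at h0
  unfold pvD
  by_cases hle : x.2.length ≤ pvF g
  · omega
  · have := pvStabGE g hpre x.2.length (by omega)
    rw [this] at h0
    omega

theorem pvSymsR {g : List (String × List String)} {start : String}
    {x : List String × List Nat} (hx : pvReach g start x) :
    ∀ t ∈ x.1, t ∈ pvSyms g start := by
  induction hx with
  | init =>
    intro t ht
    rcases List.mem_singleton.1 ht with rfl
    exact List.mem_cons_self
  | @step x y hx hy ih =>
    obtain ⟨pos, hpos, ri, hri, hc, hy'⟩ := pvExpandA_mem.1 hy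
    subst hy'
    intro t ht
    simp only [List.mem_append] at ht
    rcases ht with (ht | ht) | ht
    · exact ih t (List.mem_of_mem_take ht)
    · exact List.mem_cons_of_mem _ (List.mem_flatMap.2 ⟨g[ri], List.getElem_mem hri, ht⟩)
    · exact ih t (List.mem_of_mem_drop ht)

theorem pvIdxR {g : List (String × List String)} {start : String}
    {x : List String × List Nat} (hx : pvReach g start x) :
    ∀ i ∈ x.2, i < g.length := by
  induction hx with
  | init => intro i hi; cases hi
  | @step x y hx hy ih =>
    obtain ⟨pos, hpos, ri, hri, hc, hy'⟩ := pvExpandA_mem.1 hy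
    subst hy'
    intro i hi
    rcases List.mem_append.1 hi with hi' | hi'
    · exact ih i hi'
    · rcases List.mem_singleton.1 hi' with rfl; exact hri

theorem pvLeFoldrMax : ∀ {l : List Nat} {a : Nat}, a ∈ l → a ≤ l.foldr max 0 := by
  intro l
  induction l with
  | nil => intro a ha; cases ha
  | cons b t ih =>
    intro a ha
    rcases List.mem_cons.1 ha with rfl | ha'
    · exact le_max_left _ _
    · exact le_trans (ih ha') (le_max_right _ _)

theorem pvLenR {g : List (String × List String)} {start : String}
    {x : List String × List Nat} (hx : pvReach g start x) :
    x.1.length ≤ 1 + x.2.length * pvRmax g := by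
  induction hx with
  | init => simp
  | @step x y hx hy ih =>
    obtain ⟨pos, hpos, ri, hri, hc, hy'⟩ := pvExpandA_mem.1 hy
    subst hy'
    have hrm : (g[ri]).2.length ≤ pvRmax g :=
      pvLeFoldrMax (List.mem_map_of_mem (List.getElem_mem hri))
    have hmul : (x.2.length + 1) * pvRmax g = x.2.length * pvRmax g + pvRmax g := by ring
    simp only [List.length_append, List.length_take, List.length_drop,
      List.length_cons, List.length_nil, Nat.zero_add]
    omega

-- ---- an injective bounded encoding of reachable items: |closure| <= pvN ----
def pvEncL (b : Nat) : List Nat → Nat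
  | [] => 0
  | x :: xs => (x + 1) + (b + 1) * pvEncL b xs

def pvEnc (g : List (String × List String)) (start : String)
    (x : List String × List Nat) : Nat :=
  pvEncL (pvSyms g start).length (x.1.map (fun t => (pvSyms g start).idxOf t))
      * ((g.length + 1) ^ (pvD g start))
    + pvEncL g.length x.2

theorem pvEncL_lt {b : Nat} : ∀ {l : List Nat}, (∀ x ∈ l, x < b) →
    pvEncL b l < (b + 1) ^ l.length := by
  intro l
  induction l with
  | nil => intro _; simp [pvEncL]
  | cons x xs ih =>
    intro hb
    have hx : x < b := hb x List.mem_cons_self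
    have he := ih (fun y hy => hb y (List.mem_cons_of_mem _ hy))
    simp only [pvEncL, List.length_cons, pow_succ]
    have h2 : (b+1) * pvEncL b xs + (b+1) ≤ (b+1) * (b+1) ^ xs.length := by
      have := Nat.mul_le_mul_left (b+1) (Nat.succ_le_of_lt he)
      rw [Nat.mul_succ] at this
      omega
    have hcomm : (b+1) ^ xs.length * (b+1) = (b+1) * (b+1) ^ xs.length := Nat.mul_comm _ _
    omega

theorem pvEncL_inj {b : Nat} : ∀ {l₁ l₂ : List Nat}, (∀ x ∈ l₁, x < b) →
    (∀ x ∈ l₂, x < b) → pvEncL b l₁ = pvEncL b l₂ → l₁ = l₂ := by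
  intro l₁
  induction l₁ with
  | nil =>
    intro l₂ _ _ h
    cases l₂ with
    | nil => rfl
    | cons y ys => exfalso; simp only [pvEncL] at h; omega
  | cons x xs ih =>
    intro l₂ hb1 hb2 h
    cases l₂ with
    | nil => exfalso; simp only [pvEncL] at h; omega
    | cons y ys =>
      simp only [pvEncL] at h
      have hx : x < b := hb1 x List.mem_cons_self
      have hy : y < b := hb2 y List.mem_cons_self
      have hee : pvEncL b xs = pvEncL b ys := by
        rcases Nat.lt_trichotomy (pvEncL b xs) (pvEncL b ys) with hlt | heq | hgt
        · exfalso
          have := Nat.mul_le_mul_left (b+1) (Nat.succ_le_of_lt hlt)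
          rw [Nat.mul_succ] at this
          omega
        · exact heq
        · exfalso
          have := Nat.mul_le_mul_left (b+1) (Nat.succ_le_of_lt hgt)
          rw [Nat.mul_succ] at this
          omega
      have hxy : x = y := by rw [hee] at h; omega
      rw [hxy, ih (fun z hz => hb1 z (List.mem_cons_of_mem _ hz))
        (fun z hz => hb2 z (List.mem_cons_of_mem _ hz)) hee]

theorem pvEnc_lt {g : List (String × List String)} {start : String}
    (hpre : pvS g (pvF g + 1) start = pvS g (pvF g) start)
    {x : List String × List Nat} (hx : pvReach g start x) :
    pvEnc g start x < pvN g start := by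
  have hq : pvEncL (pvSyms g start).length (x.1.map (fun t => (pvSyms g start).idxOf t)) <
      ((pvSyms g start).length + 1) ^ (1 + pvD g start * pvRmax g) := by
    apply lt_of_lt_of_le (pvEncL_lt ?_)
    · apply Nat.pow_le_pow_right (by omega)
      have h1 := pvLenR hx
      have h2 := pvDerBound hpre hx
      have h3 : x.2.length * pvRmax g ≤ pvD g start * pvRmax g :=
        Nat.mul_le_mul_right _ h2
      simp only [List.length_map]
      omega
    · intro i hi
      obtain ⟨t, ht, rfl⟩ := List.mem_map.1 hi
      exact List.idxOf_lt_length_of_mem (pvSymsR hx t ht)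
  have hr : pvEncL g.length x.2 < (g.length + 1) ^ (pvD g start) :=
    lt_of_lt_of_le (pvEncL_lt (pvIdxR hx))
      (Nat.pow_le_pow_right (by omega) (pvDerBound hpre hx))
  unfold pvEnc pvN
  set BG := (g.length + 1) ^ (pvD g start)
  set q := pvEncL (pvSyms g start).length (x.1.map (fun t => (pvSyms g start).idxOf t))
  have h1 : q * BG + pvEncL g.length x.2 < (q+1) * BG := by
    rw [Nat.succ_mul]; omega
  have h2 : (q+1) * BG ≤ ((pvSyms g start).length + 1) ^ (1 + pvD g start * pvRmax g) * BG :=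
    Nat.mul_le_mul_right BG (Nat.succ_le_of_lt hq)
  omega

theorem pvMapIdxOf_inj (S : List String) : ∀ (l₁ l₂ : List String),
    (∀ t ∈ l₁, t ∈ S) → (∀ t ∈ l₂, t ∈ S) →
    l₁.map (fun t => S.idxOf t) = l₂.map (fun t => S.idxOf t) → l₁ = l₂ := by
  intro l₁
  induction l₁ with
  | nil =>
    intro l₂ _ _ h
    cases l₂ with
    | nil => rfl
    | cons y ys => cases h
  | cons x xs ih =>
    intro l₂ h1 h2 h
    cases l₂ with
    | nil => cases h
    | cons y ys =>
      simp only [List.map_cons, List.cons.injEq] at h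
      have hx : x = y := by
        have hxm := h1 x List.mem_cons_self
        have hym := h2 y List.mem_cons_self
        have e1 : S[S.idxOf x]'(List.idxOf_lt_length_of_mem hxm) = x :=
          List.getElem_idxOf _
        have e2 : S[S.idxOf y]'(List.idxOf_lt_length_of_mem hym) = y :=
          List.getElem_idxOf _
        rw [← e1, ← e2]
        congr 1
        exact h.1
      rw [hx, ih ys (fun t ht => h1 t (List.mem_cons_of_mem _ ht))
        (fun t ht => h2 t (List.mem_cons_of_mem _ ht)) h.2]

theorem pvEnc_inj {g : List (String × List String)} {start : String}
    (hpre : pvS g (pvF g + 1) start = pvS g (pvF g) start)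
    {x y : List String × List Nat} (hx : pvReach g start x) (hy : pvReach g start y)
    (h : pvEnc g start x = pvEnc g start y) : x = y := by
  unfold pvEnc at h
  set BG := (g.length + 1) ^ (pvD g start) with hBGdef
  have hBGpos : 0 < BG := Nat.pow_pos (by omega)
  have hrx : pvEncL g.length x.2 < BG :=
    lt_of_lt_of_le (pvEncL_lt (pvIdxR hx))
      (Nat.pow_le_pow_right (by omega) (pvDerBound hpre hx))
  have hry : pvEncL g.length y.2 < BG :=
    lt_of_lt_of_le (pvEncL_lt (pvIdxR hy))
      (Nat.pow_le_pow_right (by omega) (pvDerBound hpre hy))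
  set q1 := pvEncL (pvSyms g start).length (x.1.map (fun t => (pvSyms g start).idxOf t))
  set q2 := pvEncL (pvSyms g start).length (y.1.map (fun t => (pvSyms g start).idxOf t))
  have hq : q1 = q2 := by
    have hd := congrArg (· / BG) h
    simpa [Nat.mul_comm _ BG, Nat.mul_add_div hBGpos, Nat.div_eq_of_lt hrx,
      Nat.div_eq_of_lt hry] using hd
  have hr : pvEncL g.length x.2 = pvEncL g.length y.2 := by
    rw [hq] at h; omega
  have h2 : x.2 = y.2 := pvEncL_inj (pvIdxR hx) (pvIdxR hy) hr
  have hb1 : ∀ i ∈ x.1.map (fun t => (pvSyms g start).idxOf t), i < (pvSyms g start).length := by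
    intro i hi
    obtain ⟨t, ht, rfl⟩ := List.mem_map.1 hi
    exact List.idxOf_lt_length_of_mem (pvSymsR hx t ht)
  have hb2 : ∀ i ∈ y.1.map (fun t => (pvSyms g start).idxOf t), i < (pvSyms g start).length := by
    intro i hi
    obtain ⟨t, ht, rfl⟩ := List.mem_map.1 hi
    exact List.idxOf_lt_length_of_mem (pvSymsR hy t ht)
  have h1 : x.1 = y.1 :=
    pvMapIdxOf_inj (pvSyms g start) x.1 y.1 (pvSymsR hx) (pvSymsR hy)
      (pvEncL_inj hb1 hb2 hq)
  exact Prod.ext h1 h2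

theorem pvCard {g : List (String × List String)} {start : String}
    (hpre : pvS g (pvF g + 1) start = pvS g (pvF g) start)
    {l : List (List String × List Nat)} (hnd : l.Nodup)
    (hr : ∀ x ∈ l, pvReach g start x) : l.length ≤ pvN g start := by
  have hnd2 : (l.map (pvEnc g start)).Nodup :=
    List.Nodup.map_on (fun a ha b hb hab => pvEnc_inj hpre (hr a ha) (hr b hb) hab) hnd
  have hsub : l.map (pvEnc g start) ⊆ List.range (pvN g start) := by
    intro i hi
    obtain ⟨a, ha, rfl⟩ := List.mem_map.1 hi
    exact List.mem_range.2 (pvEnc_lt hpre (hr a ha))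
  have := List.Subperm.length_le (List.subperm_of_subset hnd2 hsub)
  simpa using this

-- ---- A-side loop lemmas ----
theorem pvDedupFoldl : ∀ (gen acc : List (List String × List Nat)), acc.Nodup →
    ∃ ext, gen.foldl (fun a i => if i ∈ a then a else a ++ [i]) acc = acc ++ ext ∧
      (acc ++ ext).Nodup ∧ (∀ i ∈ ext, i ∈ gen) ∧ (∀ i ∈ gen, i ∈ acc ++ ext) := by
  intro gen
  induction gen with
  | nil => intro acc h; exact ⟨[], by simp, by simpa using h, by simp, by simp⟩
  | cons i gen ih =>
    intro acc hacc
    simp only [List.foldl_cons]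
    by_cases hi : i ∈ acc
    · rw [if_pos hi]
      obtain ⟨ext, h1, h2, h3, h4⟩ := ih acc hacc
      refine ⟨ext, h1, h2, fun j hj => List.mem_cons_of_mem _ (h3 j hj), ?_⟩
      intro j hj
      rcases List.mem_cons.1 hj with rfl | hj'
      · exact List.mem_append_left _ hi
      · exact h4 j hj'
    · rw [if_neg hi]
      have hnd : (acc ++ [i]).Nodup := by
        simp only [List.nodup_append, List.nodup_cons, List.not_mem_nil,
          not_false_iff, List.nodup_nil, and_true, true_and]
        exact ⟨hacc, fun a ha => by simp; exact fun h => hi (h ▸ ha)⟩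
      obtain ⟨ext, h1, h2, h3, h4⟩ := ih (acc ++ [i]) hnd
      refine ⟨i :: ext, ?_, ?_, ?_, ?_⟩
      · rw [h1]; simp
      · rw [show acc ++ i :: ext = (acc ++ [i]) ++ ext by simp]; exact h2
      · intro j hj
        rcases List.mem_cons.1 hj with rfl | hj'
        · exact List.mem_cons_self
        · exact List.mem_cons_of_mem _ (h3 j hj')
      · intro j hj
        rcases List.mem_cons.1 hj with rfl | hj'
        · simp
        · have := h4 j hj'
          simp only [List.mem_append, List.mem_cons] at this ⊢
          tauto

theorem pvRoundAFoldl (g : List (String × List String)) :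
    ∀ (us acc : List (List String × List Nat)), acc.Nodup →
    ∃ ext, us.foldl (fun newE u => (pvExpandA g u.1 u.2).foldl
        (fun newE i => if i ∈ newE then newE else newE ++ [i]) newE) acc = acc ++ ext ∧
      (acc ++ ext).Nodup ∧ (∀ i ∈ ext, ∃ u ∈ us, i ∈ pvExpandA g u.1 u.2) ∧
      (∀ u ∈ us, ∀ i ∈ pvExpandA g u.1 u.2, i ∈ acc ++ ext) := by
  intro us
  induction us with
  | nil => intro acc h; exact ⟨[], by simp, by simpa using h, by simp, by simp⟩
  | cons u us ih =>
    intro acc hacc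
    simp only [List.foldl_cons]
    obtain ⟨e1, h1, h2, h3, h4⟩ := pvDedupFoldl (pvExpandA g u.1 u.2) acc hacc
    rw [h1]
    obtain ⟨e2, k1, k2, k3, k4⟩ := ih (acc ++ e1) h2
    refine ⟨e1 ++ e2, by rw [k1, List.append_assoc], by rwa [List.append_assoc] at k2, ?_, ?_⟩
    · intro i hi
      rcases List.mem_append.1 hi with h | h
      · exact ⟨u, List.mem_cons_self, h3 i h⟩
      · obtain ⟨u', hu', hi'⟩ := k3 i h
        exact ⟨u', List.mem_cons_of_mem _ hu', hi'⟩
    · intro u' hu' i hi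
      rcases List.mem_cons.1 hu' with rfl | hu''
      · rw [← List.append_assoc]
        exact List.mem_append_left _ (h4 i hi)
      · have := k4 u' hu'' i hi
        rwa [List.append_assoc] at this

theorem pvLoopA_spec {g : List (String × List String)} {start : String}
    (hcard : ∀ l : List (List String × List Nat), l.Nodup →
      (∀ x ∈ l, pvReach g start x) → l.length ≤ pvN g start) :
    ∀ (fuel : Nat) (e : List (List String × List Nat)), e.Nodup →
      (∀ x ∈ e, pvReach g start x) → pvN g start + 1 ≤ fuel + e.length →
      (pvLoopA g fuel e).Nodup ∧ (∀ x ∈ e, x ∈ pvLoopA g fuel e) ∧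
      (∀ x ∈ pvLoopA g fuel e, pvReach g start x) ∧
      pvRoundA g (pvLoopA g fuel e) = pvLoopA g fuel e := by
  intro fuel
  induction fuel with
  | zero =>
    intro e hnd hr hfuel
    exfalso
    have := hcard e hnd hr
    omega
  | succ fuel ih =>
    intro e hnd hr hfuel
    obtain ⟨ext, h1, h2, h3, h4⟩ := pvRoundAFoldl g e e hnd
    have hPr : pvRoundA g e = e ++ ext := h1
    rw [show pvLoopA g (fuel+1) e =
      if pvRoundA g e = e then e else pvLoopA g fuel (pvRoundA g e) from rfl]
    by_cases heq : pvRoundA g e = e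
    · rw [if_pos heq]
      exact ⟨hnd, fun x hx => hx, hr, heq⟩
    · rw [if_neg heq]
      have hext : ext ≠ [] := by
        intro hextnil
        rw [hextnil, List.append_nil] at hPr
        exact heq hPr
      have hreach' : ∀ x ∈ pvRoundA g e, pvReach g start x := by
        rw [hPr]
        intro x hx
        rcases List.mem_append.1 hx with hx' | hx'
        · exact hr x hx'
        · obtain ⟨u, hu, hxe⟩ := h3 x hx'
          exact pvReach.step (hr u hu) hxe
      have hnd' : (pvRoundA g e).Nodup := by rw [hPr]; exact h2
      have hlen : e.length + 1 ≤ (pvRoundA g e).length := by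
        rw [hPr, List.length_append]
        cases ext with
        | nil => exact absurd rfl hext
        | cons a t => simp
      obtain ⟨g1, g2, g3, g4⟩ := ih (pvRoundA g e) hnd' hreach' (by omega)
      refine ⟨g1, ?_, g3, g4⟩
      intro x hx
      exact g2 x (by rw [hPr]; exact List.mem_append_left _ hx)

-- ---- B-side loop lemmas ----
theorem pvZipIdxFoldl {α σ : Type} (body : σ → α → Nat → σ) (d : α) :
    ∀ (l : List α) (k : Nat) (s : σ),
      (l.zipIdx k).foldl (fun s p => body s p.1 p.2) s =
      (List.range l.length).foldl (fun s i => body s (l.getD i d) (i + k)) s := by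
  intro l
  induction l with
  | nil => intro k s; rfl
  | cons a t ih =>
    intro k s
    rw [List.zipIdx_cons, List.foldl_cons, List.length_cons, List.range_succ_eq_map,
      List.foldl_cons, List.foldl_map]
    simp only [List.getD_cons_zero, Nat.zero_add, Nat.succ_eq_add_one]
    have hfe : (fun (s : σ) (i : Nat) => body s ((a :: t).getD (i+1) d) ((i+1) + k)) =
        (fun (s : σ) (i : Nat) => body s (t.getD i d) (i + (k+1))) := by
      funext s' i
      rw [List.getD_cons_succ]
      congr 1
      omega
    rw [hfe]
    exact ih (k+1) (body s a k)

theorem pvFoldlFilterMap {α β σ : Type} (h : α → Option β) (step : σ → β → σ) :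
    ∀ (l : List α) (s : σ), (l.filterMap h).foldl step s =
      l.foldl (fun s a => match h a with | some b => step s b | none => s) s := by
  intro l
  induction l with
  | nil => intro s; rfl
  | cons a t ih =>
    intro s
    cases ha : h a with
    | none => simp only [List.filterMap_cons, ha, List.foldl_cons]; exact ih s
    | some b => simp only [List.filterMap_cons, ha, List.foldl_cons]; exact ih _

theorem pvFoldlFlatMap {α β σ : Type} (h : α → List β) (step : σ → β → σ) :
    ∀ (l : List α) (s : σ), (l.flatMap h).foldl step s =
      l.foldl (fun s a => (h a).foldl step s) s := by
  intro l
  induction l with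
  | nil => intro s; rfl
  | cons a t ih =>
    intro s
    simp only [List.flatMap_cons, List.foldl_append, List.foldl_cons]
    exact ih _

theorem pvStepB_eq (g : List (String × List String)) (toks : List String)
    (der : List Nat)
    (st : PySem.Set (List String × List Nat) × List (List String × List Nat)) :
    pvStepB g toks der st = (pvExpandA g toks der).foldl
      (fun st i => if i ∈ st.1 then st else (PySem.Set.add st.1 i, st.2 ++ [i])) st := by
  unfold pvStepB pvExpandA
  rw [pvFoldlFlatMap]
  refine Eq.trans (pvZipIdxFoldl
    (fun st tok pos => (g.zipIdx).foldl (fun st rr =>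
      if tok == rr.1.1 then
        (if (toks.take pos ++ rr.1.2 ++ toks.drop (pos + 1), der ++ [rr.2]) ∈ st.1
          then st
          else (PySem.Set.add st.1 (toks.take pos ++ rr.1.2 ++ toks.drop (pos + 1), der ++ [rr.2]),
            st.2 ++ [(toks.take pos ++ rr.1.2 ++ toks.drop (pos + 1), der ++ [rr.2])]))
      else st) st) "" toks 0 st) ?_
  apply PySem.List.foldl_congr_mem
  intro st' pos hpos
  rw [pvFoldlFilterMap]
  refine Eq.trans (pvZipIdxFoldl
    (fun st rule ri =>
      if toks.getD pos "" == rule.1 then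
        (if (toks.take pos ++ rule.2 ++ toks.drop (pos + 1), der ++ [ri]) ∈ st.1
          then st
          else (PySem.Set.add st.1 (toks.take pos ++ rule.2 ++ toks.drop (pos + 1), der ++ [ri]),
            st.2 ++ [(toks.take pos ++ rule.2 ++ toks.drop (pos + 1), der ++ [ri])]))
      else st) ("", []) g 0 st') ?_
  apply PySem.List.foldl_congr_mem
  intro st'' ri hri
  simp only [Nat.add_zero]
  split
  · rfl
  · rfl

theorem pvSetFoldl : ∀ (gen : List (List String × List Nat))
    (st : PySem.Set (List String × List Nat) × List (List String × List Nat)),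
    st.1.Nodup →
    ∃ fr, gen.foldl (fun st i => if i ∈ st.1 then st
        else (PySem.Set.add st.1 i, st.2 ++ [i])) st = (st.1 ++ fr, st.2 ++ fr) ∧
      (st.1 ++ fr).Nodup ∧ (∀ i ∈ fr, i ∈ gen) ∧ (∀ i ∈ gen, i ∈ st.1 ++ fr) := by
  intro gen
  induction gen with
  | nil =>
    intro st h
    refine ⟨[], ?_, by simpa using h, by simp, by simp⟩
    simp
  | cons i gen ih =>
    intro st hnd
    simp only [List.foldl_cons]
    by_cases hi : i ∈ st.1
    · rw [if_pos hi]
      obtain ⟨fr, h1, h2, h3, h4⟩ := ih st hnd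
      refine ⟨fr, h1, h2, fun j hj => List.mem_cons_of_mem _ (h3 j hj), ?_⟩
      intro j hj
      rcases List.mem_cons.1 hj with rfl | hj'
      · exact List.mem_append_left _ hi
      · exact h4 j hj'
    · rw [if_neg hi]
      have hadd : PySem.Set.add st.1 i = st.1 ++ [i] := by
        simp only [PySem.Set.add, PySem.Set.contains]
        rw [if_neg (by simpa using hi)]
      have hnd' : (st.1 ++ [i]).Nodup := by
        simp only [List.nodup_append, List.nodup_cons, List.not_mem_nil,
          not_false_iff, List.nodup_nil, and_true, true_and]
        exact ⟨hnd, fun a ha => by simp; exact fun h => hi (h ▸ ha)⟩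
      rw [hadd]
      obtain ⟨fr, h1, h2, h3, h4⟩ := ih (st.1 ++ [i], st.2 ++ [i]) hnd'
      refine ⟨i :: fr, ?_, ?_, ?_, ?_⟩
      · rw [h1]; simp
      · rw [show st.1 ++ i :: fr = (st.1 ++ [i]) ++ fr by simp]; exact h2
      · intro j hj
        rcases List.mem_cons.1 hj with rfl | hj'
        · exact List.mem_cons_self
        · exact List.mem_cons_of_mem _ (h3 j hj')
      · intro j hj
        rcases List.mem_cons.1 hj with rfl | hj'
        · simp
        · have := h4 j hj'
          simp only [List.mem_append, List.mem_cons] at this ⊢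
          tauto

theorem pvLoopB_spec {g : List (String × List String)} {start : String}
    {utt : List String}
    (hcard : ∀ l : List (List String × List Nat), l.Nodup →
      (∀ x ∈ l, pvReach g start x) → l.length ≤ pvN g start) :
    ∀ (fuel : Nat) (done queue : List (List String × List Nat)) (count : Nat),
      (done ++ queue).Nodup → (∀ x ∈ done ++ queue, pvReach g start x) →
      ([start], ([] : List Nat)) ∈ done ++ queue →
      (∀ u ∈ done, ∀ i ∈ pvExpandA g u.1 u.2, i ∈ done ++ queue) →
      pvN g start ≤ fuel + done.length →
      ∃ tail, pvLoopB g utt fuel queue (done ++ queue) count =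
          count + ((queue ++ tail).filter (fun x => x.1 == utt)).length ∧
        (done ++ queue ++ tail).Nodup ∧
        (∀ x ∈ done ++ queue ++ tail, pvReach g start x) ∧
        (∀ x, pvReach g start x → x ∈ done ++ queue ++ tail) := by
  intro fuel
  induction fuel with
  | zero =>
    intro done queue count hnd hr hinit hcl hfuel
    cases queue with
    | nil =>
      refine ⟨[], by simp [pvLoopB], by simpa using hnd, by simpa using hr, ?_⟩
      intro x hx
      simp only [List.append_nil] at hinit hcl ⊢
      exact pvReachSub hinit hcl x hx
    | cons u rest =>
      exfalso
      have := hcard _ hnd hr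
      simp only [List.length_append, List.length_cons] at this
      omega
  | succ fuel ih =>
    intro done queue count hnd hr hinit hcl hfuel
    cases queue with
    | nil =>
      refine ⟨[], by simp [pvLoopB], by simpa using hnd, by simpa using hr, ?_⟩
      intro x hx
      simp only [List.append_nil] at hinit hcl ⊢
      exact pvReachSub hinit hcl x hx
    | cons u rest =>
      have hu : pvReach g start u := hr u (by simp)
      have hstep := pvStepB_eq g u.1 u.2 ((done ++ u :: rest), ([] : List (List String × List Nat)))
      obtain ⟨fr, h1, h2, h3, h4⟩ := pvSetFoldl (pvExpandA g u.1 u.2)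
        ((done ++ u :: rest), []) hnd
      have hst : pvStepB g u.1 u.2 ((done ++ u :: rest), []) =
          ((done ++ u :: rest) ++ fr, [] ++ fr) := hstep.trans h1
      have hloop : pvLoopB g utt (fuel+1) (u :: rest) (done ++ u :: rest) count =
          pvLoopB g utt fuel (rest ++ fr) ((done ++ u :: rest) ++ fr)
            (if u.1 == utt then count + 1 else count) := by
        rw [show pvLoopB g utt (fuel+1) (u :: rest) (done ++ u :: rest) count =
          pvLoopB g utt fuel
            (rest ++ (pvStepB g u.1 u.2 ((done ++ u :: rest), [])).2)
            (pvStepB g u.1 u.2 ((done ++ u :: rest), [])).1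
            (if u.1 == utt then count + 1 else count) from rfl]
        rw [hst]
        rfl
      have hassoc : (done ++ [u]) ++ (rest ++ fr) = (done ++ u :: rest) ++ fr := by
        simp
      obtain ⟨tail, e1, e2, e3, e4⟩ := ih (done ++ [u]) (rest ++ fr)
        (if u.1 == utt then count + 1 else count)
        (by rw [hassoc]; exact h2)
        (by
          rw [hassoc]
          intro x hx
          rcases List.mem_append.1 hx with hx' | hx'
          · exact hr x hx'
          · exact pvReach.step hu (h3 x hx'))
        (by rw [hassoc]; exact List.mem_append_left _ hinit)
        (by
          rw [hassoc]
          intro v hv i hi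
          rcases List.mem_append.1 hv with hv' | hv'
          · exact List.mem_append_left _ (hcl v hv' i hi)
          · rcases List.mem_singleton.1 hv' with rfl
            exact h4 i hi)
        (by simp only [List.length_append, List.length_singleton]; omega)
      rw [hassoc] at e1
      refine ⟨fr ++ tail, ?_, ?_, ?_, ?_⟩
      · rw [hloop, e1]
        cases hb : (u.1 == utt)
        · simp [List.filter_append, hb]
        · simp [List.filter_append, hb]
          omega
      · have hsame : done ++ (u :: rest) ++ (fr ++ tail) =
            (done ++ [u]) ++ (rest ++ fr) ++ tail := by simp
        rw [hsame]; exact e2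
      · have hsame : done ++ (u :: rest) ++ (fr ++ tail) =
            (done ++ [u]) ++ (rest ++ fr) ++ tail := by simp
        rw [hsame]; exact e3
      · have hsame : done ++ (u :: rest) ++ (fr ++ tail) =
            (done ++ [u]) ++ (rest ++ fr) ++ tail := by simp
        rw [hsame]; exact e4

-- ===== VERDICT (by name: the statement is the Claim_ definition above) =====
theorem isambigEx_spec : Claim_equal_isambigEx := by
  intro g start utt _ hpre0
  have hpre : pvS g (pvF g + 1) start = pvS g (pvF g) start := pvPreStab hpre0
  unfold Spec_isambigEx isambigEx isambigEx_alt
  have hcard : ∀ l : List (List String × List Nat), l.Nodup →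
      (∀ x ∈ l, pvReach g start x) → l.length ≤ pvN g start :=
    fun l hnd hr => pvCard hpre hnd hr
  obtain ⟨hand, hsub, hreach, hclosed⟩ := pvLoopA_spec hcard (pvN g start + 2)
    [([start], [])] (by simp)
    (by intro x hx; rcases List.mem_singleton.1 hx with rfl; exact pvReach.init)
    (by simp)
  set r := pvLoopA g (pvN g start + 2) [([start], [])] with hr
  have hrclosed : ∀ u ∈ r, ∀ i ∈ pvExpandA g u.1 u.2, i ∈ r := by
    obtain ⟨ext, k1, k2, k3, k4⟩ := pvRoundAFoldl g r r hand
    have hx : pvRoundA g r = r ++ ext := k1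
    rw [hclosed] at hx
    have hext : ext = [] := by
      have := congrArg List.length hx
      simp only [List.length_append] at this
      cases ext with
      | nil => rfl
      | cons a t => simp at this
    intro u hu i hi
    have := k4 u hu i hi
    rwa [hext, List.append_nil] at this
  have hrmem : ∀ x, pvReach g start x → x ∈ r :=
    pvReachSub (hsub _ (by simp)) hrclosed
  have hofl : PySem.Set.ofList [(([start] : List String), ([] : List Nat))] =
      [([start], [])] := rfl
  rw [hofl]
  obtain ⟨tail, b1, b2, b3, b4⟩ := pvLoopB_spec (utt := utt) hcard (pvN g start + 1)
    [] [([start], [])] 0 (by simp)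
    (by intro x hx; rcases List.mem_singleton.1 (by simpa using hx) with rfl; exact pvReach.init)
    (by simp) (by simp) (by simp)
  simp only [List.nil_append] at b1 b2 b3 b4
  rw [b1]
  have hperm : List.Perm r ([([start], ([] : List Nat))] ++ tail) :=
    (List.perm_ext_iff_of_nodup hand b2).2 (fun a =>
      ⟨fun ha => b4 a (hreach a ha), fun ha => hrmem a (b3 a ha)⟩)
  have hlen : (r.filter (fun x => x.1 == utt)).length =
      ((([([start], ([] : List Nat))]) ++ tail).filter (fun x => x.1 == utt)).length :=
    (hperm.filter _).length_eq
  rw [hlen, Nat.zero_add]
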